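-- pv_equiv track=rewrite | github.com/ashish8796/Codewars | python-kata/numerical_of_a_string.py | numericals
-- ===== SOURCE A (Python) =====
-- def numericals(s):
--     test_s = []
--     for i in s:
--         if i not in test_s: test_s.append(i)
--     d = {i:[j for j in range(1,s.count(i)+1)] for i in test_s}
--     string = ''
--     for i in s: string += str(d[i][0]); d[i].pop(0)
--     return string
-- ===== SOURCE B (Python) =====
-- def numericals(s):
--     return ''.join(str(s[:i + 1].count(c)) for i, c in enumerate(s))
-- ===== Notes on version B (the rewrite author's own statement) =====
-- stated objective: simpler
-- what changed: Replaced A's dedup-list plus precomputed dict of [1..count] queues popped one element per character with a single comprehension in which each output digit is recomputed directly as the count of the character in the prefix s[:i+1]; no table or mutable per-char state is kept.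
import Mathlib
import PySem

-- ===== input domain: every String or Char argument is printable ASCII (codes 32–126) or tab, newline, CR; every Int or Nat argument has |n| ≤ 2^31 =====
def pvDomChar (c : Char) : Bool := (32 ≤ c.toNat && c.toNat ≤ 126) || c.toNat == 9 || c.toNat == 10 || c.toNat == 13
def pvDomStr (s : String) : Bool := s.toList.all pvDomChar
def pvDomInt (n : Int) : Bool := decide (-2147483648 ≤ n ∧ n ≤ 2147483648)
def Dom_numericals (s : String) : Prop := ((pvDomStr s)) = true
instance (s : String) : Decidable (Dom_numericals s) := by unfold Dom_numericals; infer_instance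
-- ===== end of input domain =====

-- B replaces A's dedup-list + dict of [1..count] queues (popped per character) by recounting
-- each character in its prefix; objective: simpler (same O(n^2) cost).

-- ===== PORT A =====
def numericals (s : String) : String :=
  -- test_s = []; for i in s: if i not in test_s: test_s.append(i)
  let test_s : List Char :=
    s.toList.foldl (fun acc i => if acc.contains i then acc else acc ++ [i]) []
  -- d = {i: [j for j in range(1, s.count(i)+1)] for i in test_s}
  let d : PySem.Dict Char (List Int) :=
    test_s.foldl
      (fun d i => d.insert i
        (PySem.List.pyRange 1 ((PySem.Str.count s (String.ofList [i]) : Int) + 1)))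
      PySem.Dict.empty
  -- string = ''; for i in s: string += str(d[i][0]); d[i].pop(0)
  -- every i of s is a key of d with a nonempty list, so the getD/pyGetD defaults are never used
  let r :=
    s.toList.foldl
      (fun (st : List Char × PySem.Dict Char (List Int)) i =>
        let lst := st.2.getD i []
        (st.1 ++ PySem.Int.toChars (PySem.List.pyGetD lst 0 0),
         st.2.insert i (((PySem.List.pop? lst 0).map (·.2)).getD [])))
      ([], d)
  String.ofList r.1

-- ===== PORT B =====
def numericals_alt (s : String) : String :=
  -- ''.join(str(s[:i + 1].count(c)) for i, c in enumerate(s))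
  PySem.Str.join ""
    ((PySem.List.enumerate s.toList 0).map
      (fun q => PySem.Int.toStr
        ((PySem.Chars.count (PySem.List.slice s.toList none (some (q.1 + 1))) [q.2] : Nat) : Int)))

-- ===== PRECONDITION & SPEC =====
def Spec_numericals (s : String) (out : String) : Prop := out = numericals_alt s
instance (s : String) (out : String) : Decidable (Spec_numericals s out) := by unfold Spec_numericals; infer_instance

-- ===== CLAIM (what is proved, stated in full; the proofs are below) =====
def Claim_equal_numericals : Prop := ∀ (s : String), Dom_numericals s → Spec_numericals s (numericals s)

-- ===== LEMMAS AND PROOFS =====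

-- canonical running-occurrence string over chars: p = processed prefix, r = remaining suffix
def occRun : List Char → List Char → List Char
  | _, [] => []
  | p, c :: t => PySem.Int.toChars ((p.count c : Int) + 1) ++ occRun (p ++ [c]) t

lemma countGo_singleton (c : Char) (fuel : Nat) :
    ∀ (l : List Char) (acc : Nat), l.length ≤ fuel →
      PySem.Chars.count.go [c] fuel l acc = acc + l.count c := by
  induction fuel with
  | zero =>
    intro l acc h
    have hl : l = [] := by cases l <;> simp_all
    subst hl
    show acc = acc + List.count c []
    simp
  | succ n ih =>
    intro l acc h
    cases l with
    | nil =>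
      show acc = acc + List.count c []
      simp
    | cons hd t =>
      have hstep : PySem.Chars.count.go [c] (n + 1) (hd :: t) acc
          = if ([c] : List Char).isPrefixOf (hd :: t) = true
            then PySem.Chars.count.go [c] n (List.drop ([c] : List Char).length (hd :: t)) (acc + 1)
            else PySem.Chars.count.go [c] n t acc := rfl
      rw [hstep]
      have hdrop : List.drop ([c] : List Char).length (hd :: t) = t := by simp
      by_cases hc : hd = c
      · subst hc
        have hpre : ([hd] : List Char).isPrefixOf (hd :: t) = true := by
          simp [List.isPrefixOf]
        rw [hpre, if_pos rfl, hdrop, ih t (acc + 1) (by simpa using h)]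
        simp
        omega
      · have hpre : ([c] : List Char).isPrefixOf (hd :: t) = false := by
          simp only [List.isPrefixOf, Bool.and_true]
          simp [beq_eq_false_iff_ne]
          exact fun e => hc e.symm
        rw [hpre, if_neg Bool.false_ne_true,
          ih t acc (by simpa using Nat.le_of_succ_le_succ h)]
        simp [hc]

lemma count_singleton (l : List Char) (c : Char) :
    PySem.Chars.count l [c] = l.count c := by
  have := countGo_singleton c l.length l 0 le_rfl
  simpa [PySem.Chars.count] using this

lemma join_nil_flatten (xss : List (List Char)) :
    PySem.Chars.join [] xss = xss.flatten := by
  induction xss with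
  | nil => simp [PySem.Chars.join, List.intercalate]
  | cons a t ih =>
    cases t with
    | nil => simp [PySem.Chars.join_singleton]
    | cons b r => rw [PySem.Chars.join_cons_cons]; simp [ih]

lemma dict_build (f : Char → List Int) (ks : List Char) :
    ∀ (d0 : PySem.Dict Char (List Int)) (c : Char),
      (ks.foldl (fun d k => d.insert k (f k)) d0).get? c
        = if c ∈ ks then some (f c) else d0.get? c := by
  induction ks with
  | nil => simp
  | cons k t ih =>
    intro d0 c
    simp only [List.foldl_cons, ih, List.mem_cons]
    by_cases hc : c ∈ t
    · simp [hc]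
    · by_cases hck : c = k
      · subst hck; simp [hc, PySem.Dict.get?_insert_self]
      · simp [hc, hck, PySem.Dict.get?_insert_of_ne _ _ hck]

lemma A_loop (l : List Char) (r : List Char) :
    ∀ (p acc : List Char) (d : PySem.Dict Char (List Int)),
      l = p ++ r →
      (∀ c ∈ l, d.get? c
        = some (PySem.List.pyRange ((p.count c : Int) + 1) ((l.count c : Int) + 1))) →
      (r.foldl
        (fun (st : List Char × PySem.Dict Char (List Int)) i =>
          let lst := st.2.getD i []
          (st.1 ++ PySem.Int.toChars (PySem.List.pyGetD lst 0 0),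
           st.2.insert i (((PySem.List.pop? lst 0).map (·.2)).getD [])))
        (acc, d)).1 = acc ++ occRun p r := by
  induction r with
  | nil => intro p acc d _ _; simp [occRun]
  | cons c t ih =>
    intro p acc d hl hd
    have hcl : c ∈ l := by subst hl; simp
    have hval := hd c hcl
    have hcount : l.count c = p.count c + 1 + t.count c := by
      subst hl; simp [List.count_append]; omega
    have hlt : (p.count c : Int) + 1 < (l.count c : Int) + 1 := by
      have : p.count c < l.count c := by omega
      exact_mod_cast by omega
    have hrange : PySem.List.pyRange ((p.count c : Int) + 1) ((l.count c : Int) + 1)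
        = ((p.count c : Int) + 1)
          :: PySem.List.pyRange ((p.count c : Int) + 1 + 1) ((l.count c : Int) + 1) :=
      PySem.List.pyRange_one_cons hlt
    simp only [List.foldl_cons]
    have hgetD : d.getD c []
        = ((p.count c : Int) + 1)
          :: PySem.List.pyRange ((p.count c : Int) + 1 + 1) ((l.count c : Int) + 1) := by
      simp [PySem.Dict.getD, hval, hrange]
    rw [ih (p ++ [c]) (acc ++ PySem.Int.toChars (PySem.List.pyGetD (d.getD c []) 0 0))
        _ (by simpa using hl)]
    · rw [hgetD]
      have hhd : PySem.List.pyGetD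
          (((p.count c : Int) + 1)
            :: PySem.List.pyRange ((p.count c : Int) + 1 + 1) ((l.count c : Int) + 1)) 0 0
          = (p.count c : Int) + 1 := by
        simp [PySem.List.pyGetD, PySem.List.pyGet?, PySem.List.pyIdx?]
      rw [hhd]
      simp [occRun]
    · intro c' hc'
      by_cases hcc : c' = c
      · subst hcc
        rw [hgetD]
        simp only [PySem.List.pop?_zero_cons, Option.map_some, Option.getD_some]
        rw [PySem.Dict.get?_insert_self]
        have hpc : (p ++ [c']).count c' = p.count c' + 1 := by
          rw [List.count_append]
          have h1 : ([c'] : List Char).count c' = 1 := by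
            simp
          omega
        have hc1 : (((p ++ [c']).count c' : Nat) : Int) + 1
            = ((p.count c' : Nat) : Int) + 1 + 1 := by
          rw [hpc]; push_cast; ring
        rw [hc1]
      · rw [hgetD]
        simp only [PySem.List.pop?_zero_cons, Option.map_some, Option.getD_some]
        rw [PySem.Dict.get?_insert_of_ne _ _ hcc, hd c' hc']
        have h0 : ([c] : List Char).count c' = 0 :=
          List.count_eq_zero.mpr (by simpa using hcc)
        have hpc : (p ++ [c]).count c' = p.count c' := by
          simp [List.count_append, h0]
        rw [hpc]

lemma B_chars (l : List Char) (t : List Char) :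
    ∀ (p : List Char), l = p ++ t →
      ((PySem.List.enumerate t (p.length : Int)).map
        (fun q => PySem.Int.toChars
          ((PySem.Chars.count (PySem.List.slice l none (some (q.1 + 1))) [q.2] : Nat) : Int))).flatten
      = occRun p t := by
  induction t with
  | nil => intro p _; simp [occRun, PySem.List.enumerate]
  | cons c t ih =>
    intro p hl
    rw [PySem.List.enumerate_cons]
    simp only [List.map_cons, List.flatten_cons]
    have hslice : PySem.List.slice l none (some ((p.length : Int) + 1)) = p ++ [c] := by
      have : ((p.length : Int) + 1) = ((p.length + 1 : Nat) : Int) := by push_cast; ring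
      rw [this, PySem.List.slice_to_natCast, hl, List.take_append]
      simp
    have hcnt : (PySem.Chars.count (PySem.List.slice l none (some ((p.length : Int) + 1))) [c] : Int)
        = (p.count c : Int) + 1 := by
      rw [hslice, count_singleton]
      simp [List.count_append]
    have hlen : (p.length : Int) + 1 = (((p ++ [c]).length : Nat) : Int) := by
      simp
    rw [hcnt]
    rw [hlen, ih (p ++ [c]) (by simpa using hl)]
    simp [occRun]

-- ===== VERDICT (by name: the statement is the Claim_ definition above) =====
theorem numericals_spec : Claim_equal_numericals := by
  intro s _
  unfold Spec_numericals numericals numericals_alt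
  apply String.ext
  simp only [PySem.Str.toList_join, List.map_map, Function.comp_def, PySem.Int.toList_toStr]
  rw [show ("" : String).toList = ([] : List Char) from rfl, join_nil_flatten]
  have htest : s.toList.foldl (fun acc i => if acc.contains i then acc else acc ++ [i]) []
      = PySem.Set.ofList s.toList :=
    (PySem.Set.ofList_eq_foldl s.toList).symm
  have hB : ((PySem.List.enumerate s.toList 0).map
      (fun q => PySem.Int.toChars
        ((PySem.Chars.count (PySem.List.slice s.toList none (some (q.1 + 1))) [q.2] : Nat) : Int))).flatten
      = occRun [] s.toList := by
    have := B_chars s.toList s.toList [] (by simp)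
    simpa using this
  have hA : (s.toList.foldl
      (fun (st : List Char × PySem.Dict Char (List Int)) i =>
        let lst := st.2.getD i []
        (st.1 ++ PySem.Int.toChars (PySem.List.pyGetD lst 0 0),
         st.2.insert i (((PySem.List.pop? lst 0).map (·.2)).getD [])))
      ([], (s.toList.foldl (fun acc i => if acc.contains i then acc else acc ++ [i]) []).foldl
        (fun d i => d.insert i
          (PySem.List.pyRange 1 ((PySem.Str.count s (String.ofList [i]) : Int) + 1)))
        PySem.Dict.empty)).1 = occRun [] s.toList := by
    apply A_loop s.toList s.toList [] [] _ (by simp)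
    intro c hc
    rw [htest,
      dict_build (fun i => PySem.List.pyRange 1 ((PySem.Str.count s (String.ofList [i]) : Int) + 1))]
    rw [if_pos ((PySem.Set.mem_ofList _ _).mpr hc)]
    have : PySem.Str.count s (String.ofList [c]) = s.toList.count c := by
      rw [PySem.Str.count_eq]
      simp [count_singleton]
    rw [this]
    simp
  simp only [hB]
  -- reduce the lets of port A and conclude
  show (String.ofList _).toList = _
  simpa using hA
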